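-- pv_equiv track=rewrite | github.com/uyzd/Checkers | utils/platforms.py | allowed_special
-- ===== SOURCE A (Python) =====
-- PLATFORM_SPECIAL: dict[str, frozenset[str]] = {
--     "xbox":    frozenset(),
--     "steam":   frozenset({"_"}),
--     "roblox":  frozenset({"_"}),
--     "discord": frozenset({"_", "."}),
-- }
--
-- def allowed_special(platforms: list[str]) -> frozenset[str]:
--     if not platforms:
--         return frozenset()
--     sets = [PLATFORM_SPECIAL.get(p, frozenset()) for p in platforms]
--     result = sets[0]
--     for s in sets[1:]:
--         result = result & s
--     return result
-- ===== SOURCE B (Python) =====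
-- PLATFORM_SPECIAL: dict[str, frozenset[str]] = {
--     "xbox":    frozenset(),
--     "steam":   frozenset({"_"}),
--     "roblox":  frozenset({"_"}),
--     "discord": frozenset({"_", "."}),
-- }
--
-- def allowed_special(platforms: list[str]) -> frozenset[str]:
--     if not platforms:
--         return frozenset()
--     counts: dict[str, int] = {}
--     for p in platforms:
--         for c in PLATFORM_SPECIAL.get(p, frozenset()):
--             counts[c] = counts.get(c, 0) + 1
--     n = len(platforms)
--     return frozenset(c for c, k in counts.items() if k == n)
-- ===== Notes on version B (the rewrite author's own statement) =====
-- stated objective: alternative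
-- what changed: Replaces the pairwise frozenset-intersection fold over a materialised list of sets with a single character-frequency table: count, per special character, how many platform entries allow it, then keep the characters whose count equals len(platforms).
import Mathlib
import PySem

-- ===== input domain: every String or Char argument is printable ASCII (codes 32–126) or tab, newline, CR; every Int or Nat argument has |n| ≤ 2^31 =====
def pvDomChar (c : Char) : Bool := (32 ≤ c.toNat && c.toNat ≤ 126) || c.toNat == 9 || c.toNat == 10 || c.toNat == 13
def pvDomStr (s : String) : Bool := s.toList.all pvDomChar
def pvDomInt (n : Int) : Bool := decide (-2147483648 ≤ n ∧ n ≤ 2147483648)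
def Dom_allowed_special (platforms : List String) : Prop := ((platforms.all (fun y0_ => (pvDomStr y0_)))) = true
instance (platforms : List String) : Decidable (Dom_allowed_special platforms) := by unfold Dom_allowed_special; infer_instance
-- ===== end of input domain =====

-- B replaces A's pairwise frozenset-intersection fold with a per-character frequency
-- table thresholded at len(platforms) (alternative decomposition, same cost).

-- ===== PORT A =====
-- PLATFORM_SPECIAL: dict of frozensets (PySem.Set = distinct-element list), shared data table
def pvPlatformSpecial : PySem.Dict String (List String) :=
  PySem.Dict.mk [("xbox", []), ("steam", ["_"]), ("roblox", ["_"]), ("discord", ["_", "."])]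
def allowed_special (platforms : List String) : List String :=
  if platforms = [] then []
  else
    let sets := platforms.map (fun p => pvPlatformSpecial.getD p [])
    (sets.drop 1).foldl (fun result s => PySem.Set.inter result s) (sets.headD [])


-- ===== PORT B =====
def allowed_special_alt (platforms : List String) : List String :=
  if platforms = [] then []
  else
    let counts :=
      platforms.foldl
        (fun counts p =>
          (pvPlatformSpecial.getD p []).foldl
            (fun counts c => counts.insert c (counts.getD c 0 + 1)) counts)
        (PySem.Dict.empty : PySem.Dict String Int)
    let n : Int := platforms.length
    (counts.items.filter (fun ck => ck.2 == n)).map (fun ck => ck.1)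

-- ===== PRECONDITION & SPEC =====
def Spec_allowed_special (platforms : List String) (out : List String) : Prop := out = allowed_special_alt platforms
instance (platforms : List String) (out : List String) : Decidable (Spec_allowed_special platforms out) := by unfold Spec_allowed_special; infer_instance

-- ===== CLAIM (what is proved, stated in full; the proofs are below) =====
def Claim_equal_allowed_special : Prop := ∀ (platforms : List String), Dom_allowed_special platforms → Spec_allowed_special platforms (allowed_special platforms)

-- ===== LEMMAS AND PROOFS =====

-- each platform's set is one of [], ["_"], ["_", "."]; pvCls indexes the three by length
def pvRep : Nat → List String
  | 0 => []
  | 1 => ["_"]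
  | _ => ["_", "."]
def pvCls (p : String) : Nat := (pvPlatformSpecial.getD p []).length
def pvDState (a b : Nat) : PySem.Dict String Int :=
  PySem.Dict.mk ((if a = 0 then [] else [("_", (a : Int))]) ++ (if b = 0 then [] else [(".", (b : Int))]))
def pvStep (d : PySem.Dict String Int) (p : String) : PySem.Dict String Int :=
  (pvPlatformSpecial.getD p []).foldl (fun counts c => counts.insert c (counts.getD c 0 + 1)) d

theorem pvSpecial_eq_rep (p : String) : pvPlatformSpecial.getD p [] = pvRep (pvCls p) := by
  simp only [pvCls, pvPlatformSpecial, PySem.Dict.getD_eq_get?_getD, PySem.Dict.get?_mk_cons]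
  split_ifs <;> simp [PySem.Dict.get?, pvRep]

theorem pvCls_le_two (p : String) : pvCls p ≤ 2 := by
  simp only [pvCls, pvPlatformSpecial, PySem.Dict.getD_eq_get?_getD, PySem.Dict.get?_mk_cons]
  split_ifs <;> simp [PySem.Dict.get?]

theorem pvStep_dstate (a b : Nat) (hb : a = 0 → b = 0) (p : String) :
    pvStep (pvDState a b) p
      = pvDState (a + (if pvCls p = 0 then 0 else 1)) (b + (if pvCls p = 2 then 1 else 0)) := by
  have h2 := pvCls_le_two p
  unfold pvStep
  rw [pvSpecial_eq_rep]
  interval_cases h : (pvCls p)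
  · simp [pvRep]
  · rcases Nat.eq_zero_or_pos a with ha | ha
    · have hb0 := hb ha
      subst ha; subst hb0
      simp [pvRep, pvDState, PySem.Dict.insert, PySem.Dict.getD, PySem.Dict.get?, PySem.Dict.contains]
    · rcases Nat.eq_zero_or_pos b with hb0 | hb0
      · subst hb0
        simp [pvRep, pvDState, PySem.Dict.insert, PySem.Dict.getD, PySem.Dict.get?,
          PySem.Dict.contains, Nat.pos_iff_ne_zero.mp ha]
      · simp [pvRep, pvDState, PySem.Dict.insert, PySem.Dict.getD, PySem.Dict.get?,
          PySem.Dict.contains, Nat.pos_iff_ne_zero.mp ha, Nat.pos_iff_ne_zero.mp hb0]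
  · rcases Nat.eq_zero_or_pos a with ha | ha
    · have hb0 := hb ha
      subst ha; subst hb0
      simp [pvRep, pvDState, PySem.Dict.insert, PySem.Dict.getD, PySem.Dict.get?, PySem.Dict.contains]
    · rcases Nat.eq_zero_or_pos b with hb0 | hb0
      · subst hb0
        simp [pvRep, pvDState, PySem.Dict.insert, PySem.Dict.getD, PySem.Dict.get?,
          PySem.Dict.contains, Nat.pos_iff_ne_zero.mp ha]
      · simp [pvRep, pvDState, PySem.Dict.insert, PySem.Dict.getD, PySem.Dict.get?,
          PySem.Dict.contains, Nat.pos_iff_ne_zero.mp ha, Nat.pos_iff_ne_zero.mp hb0]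

theorem pvCounts_loop (l : List String) :
    ∀ (a b : Nat), (a = 0 → b = 0) →
    l.foldl pvStep (pvDState a b)
      = pvDState (a + l.countP (fun p => !(pvCls p == 0))) (b + l.countP (fun p => pvCls p == 2)) := by
  induction l with
  | nil => intro a b _; simp
  | cons p l ih =>
    intro a b hb
    have h2 := pvCls_le_two p
    simp only [List.foldl_cons, List.countP_cons]
    rw [pvStep_dstate a b hb p]
    have hinv : a + (if pvCls p = 0 then 0 else 1) = 0 → b + (if pvCls p = 2 then 1 else 0) = 0 := by
      by_cases hc : pvCls p = 0
      · simp [hc]; omega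
      · simp [hc]
    rw [ih _ _ hinv]
    by_cases hc0 : pvCls p = 0 <;> by_cases hc2 : pvCls p = 2 <;>
      (congr 1 <;> simp [hc0, hc2] <;> omega)

theorem pvInter_rep (i j : Nat) : PySem.Set.inter (pvRep i) (pvRep j) = pvRep (min i j) := by
  match i, j with
  | 0, j => simp [pvRep, PySem.Set.inter]
  | i+1, 0 => cases i <;> simp [pvRep, PySem.Set.inter]
  | 1, 1 => decide
  | 1, (j+2) => simp [pvRep, PySem.Set.inter]
  | (i+2), 1 => simp [pvRep, PySem.Set.inter]
  | (i+2), (j+2) => simp [pvRep, PySem.Set.inter]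

theorem pvInterFold (l : List String) :
    ∀ (k : Nat),
    (l.map (fun p => pvPlatformSpecial.getD p [])).foldl (fun result s => PySem.Set.inter result s) (pvRep k)
      = pvRep (l.foldl (fun m p => min m (pvCls p)) k) := by
  induction l with
  | nil => intro k; simp
  | cons p l ih =>
    intro k
    simp only [List.map_cons, List.foldl_cons]
    rw [pvSpecial_eq_rep, pvInter_rep, ih]

theorem pvMinFold_le (l : List String) : ∀ k, l.foldl (fun m p => min m (pvCls p)) k ≤ k := by
  induction l with
  | nil => simp
  | cons p l ih =>
    intro k
    simp only [List.foldl_cons]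
    exact le_trans (ih _) (Nat.min_le_left _ _)

theorem pvMinFold_le_mem (l : List String) : ∀ k p, p ∈ l → l.foldl (fun m q => min m (pvCls q)) k ≤ pvCls p := by
  induction l with
  | nil => simp
  | cons q l ih =>
    intro k p hp
    simp only [List.foldl_cons]
    rcases List.mem_cons.mp hp with h | h
    · subst h; exact le_trans (pvMinFold_le l _) (Nat.min_le_right _ _)
    · exact ih _ _ h

theorem pvLe_minFold (l : List String) : ∀ k c, c ≤ k → (∀ p ∈ l, c ≤ pvCls p) →
    c ≤ l.foldl (fun m q => min m (pvCls q)) k := by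
  induction l with
  | nil => intro k c hk _; simpa using hk
  | cons q l ih =>
    intro k c hk hall
    simp only [List.foldl_cons]
    exact ih _ _ (le_min hk (hall q (by simp))) (fun p hp => hall p (by simp [hp]))

theorem pvMain (platforms : List String) : allowed_special platforms = allowed_special_alt platforms := by
  cases platforms with
  | nil => rfl
  | cons p0 rest =>
    simp only [allowed_special, allowed_special_alt, if_neg (List.cons_ne_nil p0 rest),
      List.map_cons, List.drop_succ_cons, List.drop_zero, List.headD_cons]
    rw [pvSpecial_eq_rep p0, pvInterFold rest (pvCls p0)]
    rw [show (fun (counts : PySem.Dict String Int) (p : String) =>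
          (pvPlatformSpecial.getD p []).foldl
            (fun counts c => counts.insert c (counts.getD c 0 + 1)) counts) = pvStep from rfl]
    rw [show (PySem.Dict.empty : PySem.Dict String Int) = pvDState 0 0 from rfl]
    rw [pvCounts_loop (p0 :: rest) 0 0 (fun _ => rfl)]
    set P := p0 :: rest with hP
    set M := rest.foldl (fun m p => min m (pvCls p)) (pvCls p0) with hM
    set A := P.countP (fun p => !(pvCls p == 0)) with hA
    set B := P.countP (fun p => pvCls p == 2) with hB
    set n := P.length with hn
    have hn1 : 1 ≤ n := by simp [hn, hP]
    have hA_le : A ≤ n := List.countP_le_length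
    have hB_le_A : B ≤ A := by
      apply List.countP_mono_left
      intro x _ hx
      simp only [beq_iff_eq] at hx ⊢
      simp [hx]
    have hM_le : M ≤ pvCls p0 := pvMinFold_le rest _
    by_cases hall0 : ∀ p ∈ P, pvCls p ≠ 0
    · have hAn : A = n := by
        rw [hA, hn]
        apply List.countP_eq_length.mpr
        intro p hp
        simpa using hall0 p hp
      by_cases hall2 : ∀ p ∈ P, pvCls p = 2
      · have hBn : B = n := by
          rw [hB, hn]
          apply List.countP_eq_length.mpr
          intro p hp
          simp [hall2 p hp]
        have hM2 : M = 2 := by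
          have h1 : 2 ≤ M := pvLe_minFold rest _ 2 (by rw [hall2 p0 (by simp [hP])])
            (fun p hp => by rw [hall2 p (by simp [hP, hp])])
          have h2 : M ≤ 2 := le_trans hM_le (pvCls_le_two p0)
          omega
        rw [hM2, hAn, hBn]
        have hn0 : n ≠ 0 := by omega
        simp [pvDState, hn0, pvRep]
      · push Not at hall2
        obtain ⟨q, hq, hq2⟩ := hall2
        have hq1 : pvCls q = 1 := by
          have := pvCls_le_two q
          have := hall0 q hq
          omega
        have hBn : B ≠ n := by
          intro h
          have := List.countP_eq_length.mp (hB ▸ hn ▸ h) q hq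
          simp [hq1] at this
        have hM1 : M = 1 := by
          have h1 : 1 ≤ M := pvLe_minFold rest _ 1
            (by have := hall0 p0 (by simp [hP]); omega)
            (fun p hp => by have := hall0 p (by simp [hP, hp]); omega)
          have h2 : M ≤ 1 := by
            rcases List.mem_cons.mp (hP ▸ hq) with h | h
            · have hc : pvCls p0 = 1 := h ▸ hq1
              omega
            · have hm := pvMinFold_le_mem rest (pvCls p0) q h
              rw [← hM] at hm
              omega
          omega
        rw [hM1, hAn]
        have hn0 : n ≠ 0 := by omega
        rcases Nat.eq_zero_or_pos B with hB0 | hB0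
        · simp [pvDState, hn0, hB0, pvRep]
        · have hB0' : B ≠ 0 := by omega
          simp [pvDState, hn0, hB0', pvRep, hBn]
    · push Not at hall0
      obtain ⟨q, hq, hq0⟩ := hall0
      have hAn : A ≠ n := by
        intro h
        have := List.countP_eq_length.mp (hA ▸ hn ▸ h) q hq
        simp [hq0] at this
      have hBn : B ≠ n := by omega
      have hM0 : M = 0 := by
        rcases List.mem_cons.mp (hP ▸ hq) with h | h
        · have hc : pvCls p0 = 0 := h ▸ hq0
          omega
        · have hm := pvMinFold_le_mem rest (pvCls p0) q h
          rw [← hM] at hm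
          omega
      rw [hM0]
      rcases Nat.eq_zero_or_pos A with hA0 | hA0
      · have hB0 : B = 0 := by omega
        simp [pvDState, hA0, hB0, pvRep]
      · have hA0' : A ≠ 0 := by omega
        rcases Nat.eq_zero_or_pos B with hB0 | hB0
        · simp [pvDState, hA0', hB0, pvRep, hAn]
        · have hB0' : B ≠ 0 := by omega
          simp [pvDState, hA0', hB0', pvRep, hAn, hBn]

-- ===== VERDICT (by name: the statement is the Claim_ definition above) =====
theorem allowed_special_spec : Claim_equal_allowed_special := by
  intro platforms _
  unfold Spec_allowed_special
  exact pvMain platforms
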